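-- pv_equiv track=rewrite | github.com/msc94/adventofcode2024 | src/day07.py | possible_combinations
-- ===== SOURCE A (Python) =====
-- def possible_combinations(goal, ints):
--     if len(ints) == 1:
--         if ints[0] <= goal:
--             return ints
--         else:
--             return []
--
--     combinations = []
--     current = ints[0]
--
--     for comb in possible_combinations(goal, ints[1:]):
--         if current + comb <= goal:
--             combinations.append(current + comb)
--         if current * comb <= goal:
--             combinations.append(current * comb)
--
--     return combinations
-- ===== SOURCE B (Python) =====
-- def possible_combinations(goal, ints):
--     results = [ints[-1]] if ints[-1] <= goal else []
--     for current in reversed(ints[:-1]):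
--         new = []
--         for comb in results:
--             if current + comb <= goal:
--                 new.append(current + comb)
--             if current * comb <= goal:
--                 new.append(current * comb)
--         results = new
--     return results
-- ===== Notes on version B (the rewrite author's own statement) =====
-- stated objective: alternative
-- what changed: Replaces A's head recursion (ints[1:] slice per level) with an iterative right-to-left fold over the list, maintaining the results list explicitly; no recursion and no list slicing per step.
import Mathlib
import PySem

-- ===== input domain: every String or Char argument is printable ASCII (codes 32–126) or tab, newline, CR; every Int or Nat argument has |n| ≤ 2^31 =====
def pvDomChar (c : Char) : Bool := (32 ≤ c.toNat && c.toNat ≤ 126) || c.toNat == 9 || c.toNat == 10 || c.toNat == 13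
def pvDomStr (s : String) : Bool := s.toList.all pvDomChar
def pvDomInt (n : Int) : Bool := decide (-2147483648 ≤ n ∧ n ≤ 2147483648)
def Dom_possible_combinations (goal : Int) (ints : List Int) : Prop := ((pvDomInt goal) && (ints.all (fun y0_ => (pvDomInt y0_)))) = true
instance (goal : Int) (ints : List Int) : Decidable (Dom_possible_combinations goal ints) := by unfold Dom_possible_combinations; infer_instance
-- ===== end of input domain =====

-- B replaces A's head recursion with an iterative right-to-left fold (alternative decomposition,
-- same cost class); equivalence is about return values, neither mutates its arguments.

-- ===== PORT A =====
-- A's recursion on ints: base case len == 1, otherwise fold over the recursive call on ints[1:].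
-- Python A never returns on ints == [] (unbounded recursion); that input is outside Pre_ and the
-- port returns [] there only to be total.
def possible_combinations (goal : Int) (ints : List Int) : List Int :=
  match ints with
  | [] => []
  | [x] => if x ≤ goal then [x] else []
  | x :: rest =>
    (possible_combinations goal rest).foldl
      (fun combinations comb =>
        let combinations :=
          if x + comb ≤ goal then combinations ++ [x + comb] else combinations
        if x * comb ≤ goal then combinations ++ [x * comb] else combinations) []

-- ===== PORT B =====
-- one pass of B's inner loop: rebuild the results list for one `current`
def pvStepB (goal : Int) (current : Int) (results : List Int) : List Int :=
  results.foldl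
    (fun new comb =>
      let new := if current + comb ≤ goal then new ++ [current + comb] else new
      if current * comb ≤ goal then new ++ [current * comb] else new) []

-- B: results from ints[-1], then fold over reversed(ints[:-1]).
-- Python B raises IndexError on ints == []; outside Pre_, the port returns [] there to be total.
def possible_combinations_alt (goal : Int) (ints : List Int) : List Int :=
  match ints.getLast? with
  | none => []
  | some last =>
    (ints.dropLast.reverse).foldl (fun results current => pvStepB goal current results)
      (if last ≤ goal then [last] else [])

-- ===== PRECONDITION & SPEC =====
-- Pre_ excludes only ints == []: there Python A never returns (unbounded recursion) and Python B
-- raises IndexError.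
def Pre_possible_combinations (goal : Int) (ints : List Int) : Prop := ints ≠ []
instance (goal : Int) (ints : List Int) : Decidable (Pre_possible_combinations goal ints) := by unfold Pre_possible_combinations; infer_instance
def pvWitness_possible_combinations : Int × List Int := (10, [2, 3])

def Spec_possible_combinations (goal : Int) (ints : List Int) (out : List Int) : Prop := out = possible_combinations_alt goal ints
instance (goal : Int) (ints : List Int) (out : List Int) : Decidable (Spec_possible_combinations goal ints out) := by unfold Spec_possible_combinations; infer_instance

-- ===== CLAIM (what is proved, stated in full; the proofs are below) =====
def Claim_equal_possible_combinations : Prop := ∀ (goal : Int) (ints : List Int), Dom_possible_combinations goal ints → Pre_possible_combinations goal ints → Spec_possible_combinations goal ints (possible_combinations goal ints)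

-- ===== LEMMAS AND PROOFS =====

-- B unrolls one step of its fold on a list of length ≥ 2
theorem alt_cons_cons (goal x y : Int) (t : List Int) :
    possible_combinations_alt goal (x :: y :: t)
      = pvStepB goal x (possible_combinations_alt goal (y :: t)) := by
  unfold possible_combinations_alt
  rcases h : (y :: t).getLast? with _ | last
  · simp at h
  · have hd : (x :: y :: t).dropLast = x :: (y :: t).dropLast := rfl
    simp [List.getLast?_cons_cons, h, hd, List.foldl_append]

-- A unrolls to the same step on a list of length ≥ 2
theorem a_cons_cons (goal x y : Int) (t : List Int) :
    possible_combinations goal (x :: y :: t)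
      = pvStepB goal x (possible_combinations goal (y :: t)) := by
  rfl

theorem main_eq (goal : Int) : ∀ (ints : List Int), ints ≠ [] →
    possible_combinations goal ints = possible_combinations_alt goal ints := by
  intro ints
  induction ints with
  | nil => intro h; exact absurd rfl h
  | cons x rest ih =>
    intro _
    cases rest with
    | nil => simp [possible_combinations, possible_combinations_alt]
    | cons y t =>
      rw [a_cons_cons, alt_cons_cons, ih (by simp)]

-- ===== VERDICT (by name: the statement is the Claim_ definition above) =====
theorem possible_combinations_spec : Claim_equal_possible_combinations := by
  intro goal ints _ hpre
  unfold Spec_possible_combinations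
  exact main_eq goal ints hpre
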